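-- pv_equiv track=rewrite | github.com/BaileyChoi/Coding_test | 프로그래머스/0/181854. 배열의 길이에 따라 다른 연산하기/배열의 길이에 따라 다른 연산하기.py | solution
-- ===== SOURCE A (Python) =====
-- def solution(arr, n):
--     answer = []
--
--     if len(arr) % 2 == 1:
--         for i, a in enumerate(arr):
--             if i % 2 == 0:
--                 answer.append(a + n)
--             else:
--                 answer.append(a)
--     else:
--         for i, a in enumerate(arr):
--             if i % 2 == 0:
--                 answer.append(a)
--             else:
--                 answer.append(a + n)
--
--     return answer
-- ===== SOURCE B (Python) =====
-- def solution(arr, n):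
--     answer = list(arr)
--     start = 0 if len(arr) % 2 == 1 else 1
--     for i in range(start, len(arr), 2):
--         answer[i] += n
--     return answer
-- ===== Notes on version B (the rewrite author's own statement) =====
-- stated objective: faster
-- what changed: Instead of enumerating every element and branching on index parity inside duplicated append loops, B copies the list once and strides directly over the affected indices (start offset from the length parity, step 2), adding n in place.
import Mathlib
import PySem

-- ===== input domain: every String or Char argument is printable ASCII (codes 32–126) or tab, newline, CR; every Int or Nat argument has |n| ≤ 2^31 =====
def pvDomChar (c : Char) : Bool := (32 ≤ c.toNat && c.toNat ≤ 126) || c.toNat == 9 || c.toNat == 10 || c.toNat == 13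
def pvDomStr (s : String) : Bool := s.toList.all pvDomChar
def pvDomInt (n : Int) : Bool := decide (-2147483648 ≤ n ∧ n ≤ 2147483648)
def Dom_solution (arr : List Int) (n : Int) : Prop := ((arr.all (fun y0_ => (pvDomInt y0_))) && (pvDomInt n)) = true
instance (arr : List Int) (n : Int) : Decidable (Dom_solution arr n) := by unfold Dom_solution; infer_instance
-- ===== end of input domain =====

-- B replaces A's duplicated enumerate-and-branch loops by one stride-2 in-place pass over a copy,
-- starting at the offset determined by the length parity (constant-factor speedup: it touches only half the indices and avoids per-element append and branch).


-- ===== PORT A =====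
def solution (arr : List Int) (n : Int) : List Int :=
  let answer : List Int := []
  if PySem.Int.mod (arr.length : Int) 2 == 1 then
    (PySem.List.enumerate arr).foldl
      (fun answer ia =>
        if PySem.Int.mod ia.1 2 == 0 then answer ++ [ia.2 + n] else answer ++ [ia.2]) answer
  else
    (PySem.List.enumerate arr).foldl
      (fun answer ia =>
        if PySem.Int.mod ia.1 2 == 0 then answer ++ [ia.2] else answer ++ [ia.2 + n]) answer

-- ===== PORT B =====
-- answer[i] += n  (i always in range; the none branch is unreachable)
def solution_alt (arr : List Int) (n : Int) : List Int :=
  let answer : List Int := arr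
  let start : Int := if PySem.Int.mod (arr.length : Int) 2 == 1 then 0 else 1
  (PySem.List.pyRange start (arr.length : Int) 2).foldl
    (fun answer i =>
      match PySem.List.pyGet? answer i with
      | some v => answer.set i.toNat (v + n)
      | none => answer)
    answer

-- ===== PRECONDITION & SPEC =====
def Spec_solution (arr : List Int) (n : Int) (out : List Int) : Prop := out = solution_alt arr n
instance (arr : List Int) (n : Int) (out : List Int) : Decidable (Spec_solution arr n out) := by unfold Spec_solution; infer_instance

-- ===== CLAIM (what is proved, stated in full; the proofs are below) =====
def Claim_equal_solution : Prop := ∀ (arr : List Int) (n : Int), Dom_solution arr n → Spec_solution arr n (solution arr n)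

-- ===== LEMMAS AND PROOFS =====

-- B's loop over the stride-2 index list: length preserved, elementwise characterisation.
lemma b_fold_char (n : Int) (st m : Nat) (arr : List Int) :
    (((List.range m).map (fun (k : Nat) => (st : Int) + 2 * (k : Int))).foldl
       (fun ans i =>
         match PySem.List.pyGet? ans i with
         | some v => ans.set i.toNat (v + n)
         | none => ans) arr).length = arr.length ∧
    ∀ j : Nat,
      (((List.range m).map (fun (k : Nat) => (st : Int) + 2 * (k : Int))).foldl
         (fun ans i =>
           match PySem.List.pyGet? ans i with
           | some v => ans.set i.toNat (v + n)
           | none => ans) arr)[j]? =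
        if st ≤ j ∧ j < st + 2 * m ∧ (j - st) % 2 = 0 then arr[j]?.map (· + n) else arr[j]? := by
  induction m with
  | zero =>
    refine ⟨rfl, fun j => ?_⟩
    rw [if_neg (by omega)]
    simp
  | succ m ih =>
    obtain ⟨ihlen, ihget⟩ := ih
    rw [List.range_succ, List.map_append, List.foldl_append]
    set R := ((List.range m).map (fun (k : Nat) => (st : Int) + 2 * (k : Int))).foldl
       (fun ans i =>
         match PySem.List.pyGet? ans i with
         | some v => ans.set i.toNat (v + n)
         | none => ans) arr with hR
    have hcast : (st : Int) + 2 * (m : Int) = ((st + 2 * m : Nat) : Int) := by push_cast; ring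
    simp only [List.map_cons, List.map_nil, List.foldl_cons, List.foldl_nil, hcast,
      PySem.List.pyGet?_natCast]
    by_cases hlt : st + 2 * m < arr.length
    · have hget : R[st + 2 * m]? = some (arr[st + 2 * m]'hlt) := by
        rw [ihget (st + 2 * m), if_neg (by omega), List.getElem?_eq_getElem hlt]
      simp only [hget, Int.toNat_natCast]
      constructor
      · rw [List.length_set, ihlen]
      · intro j
        by_cases hj : j = st + 2 * m
        · subst hj
          rw [List.getElem?_set_self (by omega), if_pos (by omega),
            List.getElem?_eq_getElem hlt]
          rfl
        · rw [List.getElem?_set_ne (by omega), ihget j]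
          by_cases hc : st ≤ j ∧ j < st + 2 * m ∧ (j - st) % 2 = 0
          · rw [if_pos hc, if_pos (by omega)]
          · rw [if_neg hc, if_neg (by omega)]
    · have hget : R[st + 2 * m]? = none := by
        rw [ihget (st + 2 * m), if_neg (by omega), List.getElem?_eq_none (by omega)]
      simp only [hget]
      refine ⟨ihlen, fun j => ?_⟩
      rw [ihget j]
      by_cases hjlen : j < arr.length
      · by_cases hc : st ≤ j ∧ j < st + 2 * m ∧ (j - st) % 2 = 0
        · rw [if_pos hc, if_pos (by omega)]
        · rw [if_neg hc, if_neg (by omega)]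
      · rw [List.getElem?_eq_none (by omega)]
        split <;> split <;> simp

-- A's append loop is a map over the enumeration.
lemma a_fold_map (g f : Int × Int → Int) (c : Int × Int → Bool) (l : List (Int × Int)) :
    l.foldl (fun ans ia => if c ia then ans ++ [f ia] else ans ++ [g ia]) [] =
      l.map (fun ia => if c ia then f ia else g ia) := by
  rw [show (fun (ans : List Int) ia => if c ia then ans ++ [f ia] else ans ++ [g ia]) =
      (fun ans ia => ans ++ [if c ia then f ia else g ia]) from by
    funext ans ia; split <;> rfl]
  rw [PySem.List.foldl_append_singleton_eq_map]
  simp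

-- ===== VERDICT (by name: the statement is the Claim_ definition above) =====
theorem solution_spec : Claim_equal_solution := by
  intro arr n _
  unfold Spec_solution solution solution_alt
  rw [PySem.Int.mod_eq_emod_of_pos (b := 2) (by omega)]
  by_cases hpar : arr.length % 2 = 1
  · -- odd length: A adds n at even indices; B starts at 0
    have h1 : ((arr.length : Int) % 2 == 1) = true := by
      simp only [beq_iff_eq]; omega
    simp only [h1, if_true]
    rw [a_fold_map, PySem.List.pyRange_of_pos 0 (arr.length : Int) (by norm_num)]
    have hmval : (if (0:Int) < (arr.length : Int) then
        (((arr.length : Int) - 0 + 2 - 1) / 2).toNat else 0) = (arr.length + 1) / 2 := by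
      split <;> omega
    rw [hmval]
    obtain ⟨hlen, hget⟩ := b_fold_char n 0 ((arr.length + 1) / 2) arr
    simp only [Nat.cast_zero] at hlen hget
    apply List.ext_getElem?
    intro j
    rw [hget j, List.getElem?_map, PySem.List.getElem?_enumerate]
    by_cases hjlen : j < arr.length
    · rw [List.getElem?_eq_getElem hjlen]
      simp only [Option.map_some,
        PySem.Int.mod_eq_emod_of_pos (a := (0:Int) + (j:Int)) (b := 2) (by omega), beq_iff_eq]
      by_cases hje : j % 2 = 0
      · rw [if_pos (by omega), if_pos (by omega)]
      · rw [if_neg (by omega), if_neg (by omega)]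
    · rw [List.getElem?_eq_none (by omega)]
      split <;> simp
  · -- even length: A adds n at odd indices; B starts at 1
    have h1 : ((arr.length : Int) % 2 == 1) = false := by
      simp only [beq_eq_false_iff_ne, ne_eq]; omega
    simp only [h1, if_false, Bool.false_eq_true]
    rw [a_fold_map, PySem.List.pyRange_of_pos 1 (arr.length : Int) (by norm_num)]
    have hmval : (if (1:Int) < (arr.length : Int) then
        (((arr.length : Int) - 1 + 2 - 1) / 2).toNat else 0) = arr.length / 2 := by
      split <;> omega
    rw [hmval]
    obtain ⟨hlen, hget⟩ := b_fold_char n 1 (arr.length / 2) arr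
    simp only [Nat.cast_one] at hlen hget
    apply List.ext_getElem?
    intro j
    rw [hget j, List.getElem?_map, PySem.List.getElem?_enumerate]
    by_cases hjlen : j < arr.length
    · rw [List.getElem?_eq_getElem hjlen]
      simp only [Option.map_some,
        PySem.Int.mod_eq_emod_of_pos (a := (0:Int) + (j:Int)) (b := 2) (by omega), beq_iff_eq]
      by_cases hje : j % 2 = 0
      · rw [if_pos (by omega), if_neg (by omega)]
      · rw [if_neg (by omega), if_pos (by omega)]
    · rw [List.getElem?_eq_none (by omega)]
      split <;> simp
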